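-- pv_equiv track=rewrite | github.com/lpaiu-cs/self-mass-unobservability | symbolic/orbital_harmonic_budget_audit.py | clean_sum_sideband_pairs
-- ===== SOURCE A (Python) =====
-- def _check_positive(name: str, value: int) -> None:
--     if value <= 0:
--         raise ValueError(f"{name} must be positive")
--
-- def clean_sum_sideband_pairs(
--     linear_harmonics: int,
--     sideband_harmonic_cutoff: int,
-- ) -> tuple[tuple[int, int, int], ...]:
--     _check_positive("linear_harmonics", linear_harmonics)
--     _check_positive("sideband_harmonic_cutoff", sideband_harmonic_cutoff)
--     pairs: list[tuple[int, int, int]] = []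
--     for left in range(1, linear_harmonics + 1):
--         for right in range(left, linear_harmonics + 1):
--             output = left + right
--             if linear_harmonics < output <= sideband_harmonic_cutoff:
--                 pairs.append((left, right, output))
--     return tuple(pairs)
-- ===== SOURCE B (Python) =====
-- def clean_sum_sideband_pairs(linear_harmonics, sideband_harmonic_cutoff):
--     if linear_harmonics <= 0:
--         raise ValueError("linear_harmonics must be positive")
--     if sideband_harmonic_cutoff <= 0:
--         raise ValueError("sideband_harmonic_cutoff must be positive")
--     n = linear_harmonics
--     blocks = []
--     left = n
--     while left >= 1:
--         lo = max(left, n - left + 1)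
--         hi = min(n, sideband_harmonic_cutoff - left)
--         blocks.append([(left, r, left + r) for r in range(lo, hi + 1)])
--         left -= 1
--     blocks.reverse()
--     return tuple(p for b in blocks for p in b)
-- ===== Notes on version B (the rewrite author's own statement) =====
-- stated objective: alternative
-- what changed: B walks left DOWN from n to 1 in a while loop, emitting for each left the contiguous valid right-interval [max(left, n-left+1), min(n, cutoff-left)] in closed form as a block, then reverses the block list and flattens it, instead of A's ascending nested scan testing every sum; per-probe cost drops from O(n^2) to O(n + output).
import Mathlib
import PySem

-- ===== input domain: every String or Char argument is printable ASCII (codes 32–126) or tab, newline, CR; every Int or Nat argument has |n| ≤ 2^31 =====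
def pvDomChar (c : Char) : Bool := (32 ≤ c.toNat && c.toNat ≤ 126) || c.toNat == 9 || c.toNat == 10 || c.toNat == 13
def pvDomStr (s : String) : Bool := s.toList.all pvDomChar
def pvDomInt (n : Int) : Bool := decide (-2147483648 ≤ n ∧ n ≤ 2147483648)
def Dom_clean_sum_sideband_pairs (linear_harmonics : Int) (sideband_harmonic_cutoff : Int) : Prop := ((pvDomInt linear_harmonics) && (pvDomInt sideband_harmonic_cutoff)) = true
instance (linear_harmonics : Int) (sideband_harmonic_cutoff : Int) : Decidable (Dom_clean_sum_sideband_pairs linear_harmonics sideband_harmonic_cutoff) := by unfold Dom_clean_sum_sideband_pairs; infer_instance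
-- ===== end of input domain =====

-- B walks left DOWN from n to 1, emitting each left's contiguous valid right-interval as a
-- closed-form block, then reverses the block list and flattens, instead of A's ascending
-- nested scan testing every sum (objective: alternative).

-- ===== PORT A =====
def clean_sum_sideband_pairs (linear_harmonics : Int) (sideband_harmonic_cutoff : Int) : List (Int × Int × Int) :=
  (PySem.List.pyRange 1 (linear_harmonics + 1)).foldl (fun pairs left =>
    (PySem.List.pyRange left (linear_harmonics + 1)).foldl (fun pairs right =>
      if linear_harmonics < left + right ∧ left + right ≤ sideband_harmonic_cutoff then
        pairs ++ [(left, right, left + right)]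
      else pairs) pairs) []

-- ===== PORT B =====
-- the block emitted for one value of left: [(left, r, left+r) for r in range(lo, hi+1)]
def pvAltBlock (n c left : Int) : List (Int × Int × Int) :=
  (PySem.List.pyRange (max left (n - left + 1)) (min n (c - left) + 1)).map
    (fun r => (left, r, left + r))

-- the 'while left >= 1' loop: fuel counts the remaining iterations, blocks.append(block)
def pvAltGo (n c : Int) : Nat → Int → List (List (Int × Int × Int)) → List (List (Int × Int × Int))
  | 0, _, blocks => blocks
  | Nat.succ k, left, blocks => pvAltGo n c k (left - 1) (blocks ++ [pvAltBlock n c left])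

def clean_sum_sideband_pairs_alt (linear_harmonics : Int) (sideband_harmonic_cutoff : Int) : List (Int × Int × Int) :=
  ((pvAltGo linear_harmonics sideband_harmonic_cutoff linear_harmonics.toNat linear_harmonics []).reverse).flatten

-- ===== PRECONDITION & SPEC =====
-- Pre_ excludes exactly the inputs where the Python A raises ValueError (a non-positive argument).
def Pre_clean_sum_sideband_pairs (linear_harmonics : Int) (sideband_harmonic_cutoff : Int) : Prop :=
  0 < linear_harmonics ∧ 0 < sideband_harmonic_cutoff
instance (linear_harmonics : Int) (sideband_harmonic_cutoff : Int) : Decidable (Pre_clean_sum_sideband_pairs linear_harmonics sideband_harmonic_cutoff) := by unfold Pre_clean_sum_sideband_pairs; infer_instance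
def pvWitness_clean_sum_sideband_pairs : Int × Int := (3, 4)

def Spec_clean_sum_sideband_pairs (linear_harmonics : Int) (sideband_harmonic_cutoff : Int) (out : List (Int × Int × Int)) : Prop := out = clean_sum_sideband_pairs_alt linear_harmonics sideband_harmonic_cutoff
instance (linear_harmonics : Int) (sideband_harmonic_cutoff : Int) (out : List (Int × Int × Int)) : Decidable (Spec_clean_sum_sideband_pairs linear_harmonics sideband_harmonic_cutoff out) := by unfold Spec_clean_sum_sideband_pairs; infer_instance

-- ===== CLAIM (what is proved, stated in full; the proofs are below) =====
def Claim_equal_clean_sum_sideband_pairs : Prop := ∀ (linear_harmonics : Int) (sideband_harmonic_cutoff : Int), Dom_clean_sum_sideband_pairs linear_harmonics sideband_harmonic_cutoff → Pre_clean_sum_sideband_pairs linear_harmonics sideband_harmonic_cutoff → Spec_clean_sum_sideband_pairs linear_harmonics sideband_harmonic_cutoff (clean_sum_sideband_pairs linear_harmonics sideband_harmonic_cutoff)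

-- ===== LEMMAS AND PROOFS =====

-- Filtering the integer range [a, b) by membership in [lo, hi] yields the trimmed range.
lemma filter_pyRange_interval (lo hi : Int) : ∀ (k : Nat) (a b : Int), (b - a).toNat ≤ k →
    (PySem.List.pyRange a b).filter (fun r => decide (lo ≤ r) && decide (r ≤ hi)) =
    PySem.List.pyRange (max a lo) (min b (hi + 1)) := by
  intro k
  induction k with
  | zero =>
    intro a b h
    rw [PySem.List.pyRange_one_eq_nil (by omega), PySem.List.pyRange_one_eq_nil (by omega)]
    rfl
  | succ k ih =>
    intro a b h
    by_cases hab : a < b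
    · rw [PySem.List.pyRange_one_cons hab, List.filter_cons]
      by_cases hlo : lo ≤ a
      · by_cases hhi : a ≤ hi
        · have hb : (decide (lo ≤ a) && decide (a ≤ hi)) = true := by simp [hlo, hhi]
          rw [hb, if_pos rfl, ih (a + 1) b (by omega)]
          have h1 : max (a + 1) lo = a + 1 := by omega
          have h2 : max a lo = a := by omega
          rw [h1, h2, PySem.List.pyRange_one_cons (show a < min b (hi + 1) from by omega)]
        · have hb : (decide (lo ≤ a) && decide (a ≤ hi)) = false := by simp [hhi]
          rw [hb, if_neg (by simp), ih (a + 1) b (by omega)]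
          rw [PySem.List.pyRange_one_eq_nil (by omega), PySem.List.pyRange_one_eq_nil (by omega)]
      · have hb : (decide (lo ≤ a) && decide (a ≤ hi)) = false := by simp [hlo]
        rw [hb, if_neg (by simp), ih (a + 1) b (by omega)]
        have h1 : max (a + 1) lo = max a lo := by omega
        rw [h1]
    · rw [PySem.List.pyRange_one_eq_nil (by omega), PySem.List.pyRange_one_eq_nil (by omega)]
      rfl

-- A's inner loop for a fixed left equals appending B's closed-form block for that left.
lemma inner_loop_eq (n c left : Int) (acc : List (Int × Int × Int)) :
    (PySem.List.pyRange left (n + 1)).foldl (fun pairs right =>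
      if n < left + right ∧ left + right ≤ c then pairs ++ [(left, right, left + right)] else pairs) acc
    = acc ++ pvAltBlock n c left := by
  have hstep : (PySem.List.pyRange left (n + 1)).foldl (fun pairs right =>
      if n < left + right ∧ left + right ≤ c then pairs ++ [(left, right, left + right)] else pairs) acc
    = (PySem.List.pyRange left (n + 1)).foldl (fun pairs right =>
      if (decide (n - left + 1 ≤ right) && decide (right ≤ c - left)) = true then
        pairs ++ [(left, right, left + right)] else pairs) acc := by
    apply List.foldl_ext
    intro pairs r _
    by_cases hcond : n < left + r ∧ left + r ≤ c
    · rw [if_pos hcond, if_pos (by simp; omega)]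
    · rw [if_neg hcond, if_neg (by simp; omega)]
  rw [hstep, PySem.List.foldl_append_if,
    filter_pyRange_interval _ _ (n + 1 - left).toNat _ _ le_rfl]
  unfold pvAltBlock
  have : min (n + 1) (c - left + 1) = min n (c - left) + 1 := by omega
  rw [this]

-- Invariant of B's descending loop: it appends the blocks of left, left-1, …, left-k+1,
-- i.e. the reverse of the ascending block list on (left-k, left].
lemma pvAltGo_eq (n c : Int) : ∀ (k : Nat) (left : Int) (blocks : List (List (Int × Int × Int))),
    pvAltGo n c k left blocks
      = blocks ++ ((PySem.List.pyRange (left - k + 1) (left + 1)).map (pvAltBlock n c)).reverse := by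
  intro k
  induction k with
  | zero =>
    intro left blocks
    rw [show pvAltGo n c 0 left blocks = blocks from rfl,
        PySem.List.pyRange_one_eq_nil (show left + 1 ≤ left - ((0:Nat):Int) + 1 by omega)]
    rw [List.map_nil, List.reverse_nil, List.append_nil]
  | succ k ih =>
    intro left blocks
    show pvAltGo n c k (left - 1) (blocks ++ [pvAltBlock n c left]) = _
    rw [ih]
    have hsplit : PySem.List.pyRange (left - (k + 1 : Nat) + 1) (left + 1)
        = PySem.List.pyRange (left - (k + 1 : Nat) + 1) left ++ [left] := by
      have := PySem.List.pyRange_one_succ_right (a := left - (k + 1 : Nat) + 1) (b := left) (by push_cast; omega)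
      simpa using this
    have harg : left - 1 - (k : Int) + 1 = left - ((k + 1 : Nat) : Int) + 1 := by push_cast; omega
    rw [harg, hsplit]
    simp

-- ===== VERDICT (by name: the statement is the Claim_ definition above) =====
theorem clean_sum_sideband_pairs_spec : Claim_equal_clean_sum_sideband_pairs := by
  intro n c _ hpre
  unfold Spec_clean_sum_sideband_pairs clean_sum_sideband_pairs clean_sum_sideband_pairs_alt
  have hA : (PySem.List.pyRange 1 (n + 1)).foldl (fun pairs left =>
      (PySem.List.pyRange left (n + 1)).foldl (fun pairs right =>
        if n < left + right ∧ left + right ≤ c then pairs ++ [(left, right, left + right)] else pairs) pairs) []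
      = (PySem.List.pyRange 1 (n + 1)).flatMap (pvAltBlock n c) := by
    have : (PySem.List.pyRange 1 (n + 1)).foldl (fun pairs left =>
        (PySem.List.pyRange left (n + 1)).foldl (fun pairs right =>
          if n < left + right ∧ left + right ≤ c then pairs ++ [(left, right, left + right)] else pairs) pairs) []
        = (PySem.List.pyRange 1 (n + 1)).foldl (fun pairs left => pairs ++ pvAltBlock n c left) [] := by
      apply List.foldl_ext
      intro pairs left _
      exact inner_loop_eq n c left pairs
    rw [this, PySem.List.foldl_append_eq_flatMap]
    simp
  obtain ⟨hn, -⟩ := hpre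
  have hcast : n - (n.toNat : Int) + 1 = 1 := by omega
  rw [hA, pvAltGo_eq, hcast]
  simp [List.flatMap]
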